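-- pv_equiv track=rewrite | github.com/Dongyurocket/literature-management-tool | literature_manager/ocr_service.py | select_umi_ocr_asset
-- ===== SOURCE A (Python) =====
-- UMI_VARIANTS = ("rapid", "paddle")
--
-- def _normalize_variant(value: str) -> str:
--     normalized = (value or "").strip().lower()
--     return normalized if normalized in UMI_VARIANTS else "rapid"
--
-- def select_umi_ocr_asset(assets: list[dict], preferred_variant: str) -> dict:
--     variant = _normalize_variant(preferred_variant)
--     normalized_assets = [item for item in assets if str(item.get("name", "")).lower().endswith(".exe")]
--     if not normalized_assets:
--         raise ValueError("Umi-OCR 最新发布未提供 Windows 安装包。")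
--
--     preferred_tokens = [f"umi-ocr_{variant}_", variant]
--     fallback_tokens = [token for token in UMI_VARIANTS if token != variant]
--
--     for asset in normalized_assets:
--         name = str(asset.get("name", "")).lower()
--         if all(token in name for token in preferred_tokens[:1]):
--             return asset
--     for asset in normalized_assets:
--         name = str(asset.get("name", "")).lower()
--         if any(token in name for token in fallback_tokens):
--             return asset
--     return normalized_assets[0]
-- ===== SOURCE B (Python) =====
-- UMI_VARIANTS = ("rapid", "paddle")
--
--
-- def _normalize_variant(value: str) -> str:
--     normalized = (value or "").strip().lower()
--     return normalized if normalized in UMI_VARIANTS else "rapid"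
--
--
-- def select_umi_ocr_asset(assets: list, preferred_variant: str) -> dict:
--     variant = _normalize_variant(preferred_variant)
--     candidates = [item for item in assets if str(item.get("name", "")).lower().endswith(".exe")]
--     if not candidates:
--         raise ValueError("Umi-OCR 最新发布未提供 Windows 安装包。")
--
--     preferred_sub = f"umi-ocr_{variant}_"
--     other_tokens = [token for token in UMI_VARIANTS if token != variant]
--
--     def rank(item):
--         name = str(item.get("name", "")).lower()
--         if preferred_sub in name:
--             return 0
--         if any(token in name for token in other_tokens):
--             return 1
--         return 2
--
--     # single priority-select pass: earliest asset of minimal rank, default first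
--     best, best_rank = candidates[0], 2
--     for item in candidates:
--         r = rank(item)
--         if r < best_rank:
--             best, best_rank = item, r
--     return best
-- ===== Notes on version B (the rewrite author's own statement) =====
-- stated objective: alternative
-- what changed: Replaces A's two sequential scans (preferred token, then fallback token) with a single priority-select pass that ranks each .exe asset 0/1/2 and keeps the earliest minimal-rank asset, defaulting to the first.
import Mathlib
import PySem

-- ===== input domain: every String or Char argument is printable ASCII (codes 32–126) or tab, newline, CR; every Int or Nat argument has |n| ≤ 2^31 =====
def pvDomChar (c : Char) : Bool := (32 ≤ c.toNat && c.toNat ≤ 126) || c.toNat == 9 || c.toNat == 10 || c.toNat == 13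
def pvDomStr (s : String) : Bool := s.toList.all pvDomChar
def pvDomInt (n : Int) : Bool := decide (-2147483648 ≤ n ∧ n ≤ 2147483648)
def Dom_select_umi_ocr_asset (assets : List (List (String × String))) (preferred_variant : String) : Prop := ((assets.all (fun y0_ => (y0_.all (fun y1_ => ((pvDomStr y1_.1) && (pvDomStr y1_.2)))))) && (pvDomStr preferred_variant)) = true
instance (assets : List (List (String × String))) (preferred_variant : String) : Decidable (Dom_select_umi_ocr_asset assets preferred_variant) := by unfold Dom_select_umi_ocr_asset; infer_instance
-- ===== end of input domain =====

-- B replaces A's two sequential scans with one priority-select pass (rank 0/1/2, earliest minimum); same behaviour, same cost.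


-- ===== PORT A =====

-- shared module helper _normalize_variant; '(value or "")' is value unless empty
def pvNormalizeVariant (value : String) : String :=
  let normalized := PySem.Str.lower (PySem.Str.strip (if value = "" then "" else value))
  if normalized ∈ ["rapid", "paddle"] then normalized else "rapid"

-- str(item.get("name", "")).lower() (values are strings, so str() is the identity)
def pvLowerName (item : List (String × String)) : String :=
  PySem.Str.lower (PySem.Dict.getD ⟨item⟩ "name" "")

-- the filter predicate of the comprehension (shared text in A and B)
def pvIsExe (item : List (String × String)) : Bool :=
  PySem.Str.endswith (pvLowerName item) ".exe"

-- port of A; on an empty filtered list Python raises ValueError (excluded by Pre_), we return []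
def select_umi_ocr_asset (assets : List (List (String × String))) (preferred_variant : String) : List (String × String) :=
  let variant := pvNormalizeVariant preferred_variant
  let normalized_assets := assets.filter pvIsExe
  let preferred_tokens := [PySem.Str.join "" ["umi-ocr_", variant, "_"], variant]
  let fallback_tokens := ["rapid", "paddle"].filter (fun t => t ≠ variant)
  match normalized_assets.find? (fun asset => (preferred_tokens.take 1).all (fun t => PySem.Str.isIn t (pvLowerName asset))) with
  | some asset => asset
  | none =>
    match normalized_assets.find? (fun asset => fallback_tokens.any (fun t => PySem.Str.isIn t (pvLowerName asset))) with
    | some asset => asset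
    | none => normalized_assets.headD []

-- ===== PORT B =====

-- rank of Source B: 0 preferred substring, 1 fallback token, 2 otherwise
def pvRank (preferred_sub : String) (other_tokens : List String) (item : List (String × String)) : Int :=
  let name := pvLowerName item
  if PySem.Str.isIn preferred_sub name then 0
  else if other_tokens.any (fun t => PySem.Str.isIn t name) then 1
  else 2

def select_umi_ocr_asset_alt (assets : List (List (String × String))) (preferred_variant : String) : List (String × String) :=
  let variant := pvNormalizeVariant preferred_variant
  let candidates := assets.filter pvIsExe
  match candidates with
  | [] => []   -- Python raises ValueError here (excluded by Pre_)
  | c0 :: _ =>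
    let preferred_sub := PySem.Str.join "" ["umi-ocr_", variant, "_"]
    let other_tokens := ["rapid", "paddle"].filter (fun t => t ≠ variant)
    (candidates.foldl
      (fun (st : List (String × String) × Int) item =>
        let r := pvRank preferred_sub other_tokens item
        if r < st.2 then (item, r) else st)
      (c0, 2)).1

-- ===== PRECONDITION & SPEC =====
-- Pre_ excludes exactly the inputs with no '.exe'-named asset, on which A raises ValueError.
def Pre_select_umi_ocr_asset (assets : List (List (String × String))) (preferred_variant : String) : Prop :=
  assets.filter pvIsExe ≠ []
instance (assets : List (List (String × String))) (preferred_variant : String) : Decidable (Pre_select_umi_ocr_asset assets preferred_variant) := by unfold Pre_select_umi_ocr_asset; infer_instance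

def pvWitness_select_umi_ocr_asset : (List (List (String × String))) × String :=
  ([[("name", "Umi-OCR_Rapid_v2.exe")], [("name", "Umi-OCR_Paddle_v2.exe")]], "paddle")

def Spec_select_umi_ocr_asset (assets : List (List (String × String))) (preferred_variant : String) (out : List (String × String)) : Prop := out = select_umi_ocr_asset_alt assets preferred_variant
instance (assets : List (List (String × String))) (preferred_variant : String) (out : List (String × String)) : Decidable (Spec_select_umi_ocr_asset assets preferred_variant out) := by unfold Spec_select_umi_ocr_asset; infer_instance

-- ===== CLAIM (what is proved, stated in full; the proofs are below) =====
def Claim_equal_select_umi_ocr_asset : Prop := ∀ (assets : List (List (String × String))) (preferred_variant : String), Dom_select_umi_ocr_asset assets preferred_variant → Pre_select_umi_ocr_asset assets preferred_variant → Spec_select_umi_ocr_asset assets preferred_variant (select_umi_ocr_asset assets preferred_variant)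

-- ===== LEMMAS AND PROOFS =====

-- the priority-select step, abstracted over the two boolean tests
def pvStep {α : Type} (p0 p1 : α → Bool) (st : α × Int) (x : α) : α × Int :=
  let r : Int := if p0 x then 0 else if p1 x then 1 else 2
  if r < st.2 then (x, r) else st
theorem pvFold0 {α : Type} (p0 p1 : α → Bool) (l : List α) (a : α) :
    l.foldl (pvStep p0 p1) (a, 0) = (a, 0) := by
  induction l with
  | nil => rfl
  | cons x t ih =>
      simp only [List.foldl_cons, pvStep]
      split_ifs <;> simp_all
theorem pvFold1 {α : Type} (p0 p1 : α → Bool) (l : List α) (a : α) :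
    l.foldl (pvStep p0 p1) (a, 1) =
      match l.find? p0 with
      | some y => (y, 0)
      | none => (a, 1) := by
  induction l generalizing a with
  | nil => rfl
  | cons x t ih =>
      by_cases h0 : p0 x
      · simp only [List.foldl_cons, pvStep, h0, List.find?_cons_of_pos h0]
        norm_num [pvFold0]
      · simp only [List.foldl_cons, pvStep, h0, List.find?_cons_of_neg h0]
        split_ifs with h1 <;> simp_all
theorem pvFold2 {α : Type} (p0 p1 : α → Bool) (l : List α) (a : α) :
    l.foldl (pvStep p0 p1) (a, 2) =
      match l.find? p0 with
      | some y => (y, 0)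
      | none =>
        match l.find? (fun x => !p0 x && p1 x) with
        | some y => (y, 1)
        | none => (a, 2) := by
  induction l generalizing a with
  | nil => rfl
  | cons x t ih =>
      rw [List.foldl_cons]
      by_cases h0 : p0 x
      · rw [show pvStep p0 p1 (a, 2) x = (x, 0) by simp [pvStep, h0],
            List.find?_cons_of_pos h0, pvFold0]
      · by_cases h1 : p1 x
        · rw [show pvStep p0 p1 (a, 2) x = (x, 1) by simp [pvStep, h0, h1],
              List.find?_cons_of_neg h0, pvFold1,
              List.find?_cons_of_pos (p := fun x => !p0 x && p1 x) (by simp [h0, h1])]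
        · rw [show pvStep p0 p1 (a, 2) x = (a, 2) by simp [pvStep, h0, h1],
              List.find?_cons_of_neg h0,
              List.find?_cons_of_neg (p := fun x => !p0 x && p1 x) (by simp [h0, h1])]
          exact ih a

theorem pvFind?_congr {α : Type} (p q : α → Bool) (l : List α)
    (h : ∀ x ∈ l, p x = q x) : l.find? p = l.find? q := by
  induction l with
  | nil => rfl
  | cons x t ih =>
      have hx := h x (by simp)
      by_cases hp : p x
      · rw [List.find?_cons_of_pos hp, List.find?_cons_of_pos (hx ▸ hp)]
      · rw [List.find?_cons_of_neg hp,
            List.find?_cons_of_neg (by rw [← hx]; exact hp)]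
        exact ih (fun y hy => h y (by simp [hy]))

-- ===== VERDICT (by name: the statement is the Claim_ definition above) =====
theorem select_umi_ocr_asset_spec : Claim_equal_select_umi_ocr_asset := by
  intro assets preferred_variant _ hpre
  unfold Spec_select_umi_ocr_asset select_umi_ocr_asset select_umi_ocr_asset_alt
  set variant := pvNormalizeVariant preferred_variant with hv
  set l := assets.filter pvIsExe with hl
  obtain ⟨c0, t, hct⟩ : ∃ c0 t, l = c0 :: t := by
    cases h : l with
    | nil => exact absurd h hpre
    | cons a b => exact ⟨a, b, rfl⟩
  rw [hct]
  simp only []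
  set sub := PySem.Str.join "" ["umi-ocr_", variant, "_"] with hsub
  set fb := ["rapid", "paddle"].filter (fun t => t ≠ variant) with hfb
  set P0 : List (String × String) → Bool := fun asset => PySem.Str.isIn sub (pvLowerName asset) with hP0
  set P1 : List (String × String) → Bool := fun asset => fb.any (fun tok => PySem.Str.isIn tok (pvLowerName asset)) with hP1
  have hstep : (fun (st : List (String × String) × Int) item =>
      let r := pvRank sub fb item
      if r < st.2 then (item, r) else st) = pvStep P0 P1 := by
    funext st item
    simp [pvRank, pvStep, hP0, hP1]
  rw [hstep, pvFold2 P0 P1 (c0 :: t) c0]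
  have hA0 : (c0 :: t).find? (fun asset => ([sub, variant].take 1).all (fun tok => PySem.Str.isIn tok (pvLowerName asset))) = (c0 :: t).find? P0 := by
    apply pvFind?_congr
    intro x _
    simp [hP0]
  rw [hA0]
  cases hfind : (c0 :: t).find? P0 with
  | some y => simp
  | none =>
      have hnone : ∀ x ∈ c0 :: t, P0 x = false := by
        intro x hx
        simpa using List.find?_eq_none.mp hfind x hx
      have hA1 : (c0 :: t).find? P1 = (c0 :: t).find? (fun x => !P0 x && P1 x) := by
        apply pvFind?_congr
        intro x hx
        simp [hnone x hx]
      rw [hA1]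
      cases (c0 :: t).find? (fun x => !P0 x && P1 x) with
      | some y => simp
      | none => simp
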